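-- pv_equiv track=rewrite | github.com/YifeiSun01/shiyou_interview | test_2.py | replace_repeated_chars
-- ===== SOURCE A (Python) =====
-- def replace_repeated_chars(input_str, k):
--     modified_str = list(input_str)
--     for i in range(len(input_str)):
--         start_index = max(0, i - k)
--         for j in range(start_index, i):
--             if input_str[i] == input_str[j]:
--                 modified_str[i] = '-'
--                 break
--     return ''.join(modified_str)
-- ===== SOURCE B (Python) =====
-- def replace_repeated_chars(input_str, k):
--     last = {}
--     out = []
--     for i, c in enumerate(input_str):
--         j = last.get(c)
--         out.append('-' if j is not None and i - j <= k else c)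
--         last[c] = i
--     return ''.join(out)
-- ===== Notes on version B (the rewrite author's own statement) =====
-- stated objective: faster
-- what changed: B replaces A's per-position rescan of the previous-k window (nested loops) by a single pass that keeps a last-occurrence dictionary and marks a position iff the latest earlier occurrence of its character is within k.
import Mathlib
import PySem

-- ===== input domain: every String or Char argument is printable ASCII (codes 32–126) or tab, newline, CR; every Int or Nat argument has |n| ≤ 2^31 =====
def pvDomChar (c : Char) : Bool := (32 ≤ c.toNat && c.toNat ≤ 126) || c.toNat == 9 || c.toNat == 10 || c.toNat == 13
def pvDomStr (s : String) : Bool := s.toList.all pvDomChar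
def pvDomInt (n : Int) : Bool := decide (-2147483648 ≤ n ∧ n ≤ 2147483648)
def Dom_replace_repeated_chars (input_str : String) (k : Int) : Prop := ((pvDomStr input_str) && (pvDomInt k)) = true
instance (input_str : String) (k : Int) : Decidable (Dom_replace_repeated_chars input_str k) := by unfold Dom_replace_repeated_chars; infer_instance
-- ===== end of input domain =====

-- B replaces A's per-position rescan of the previous-k window by a single pass with a
-- last-occurrence dictionary (mark position i iff the latest earlier occurrence of its char is within k).

-- ===== PORT A =====
-- inner loop 'for j in range(start_index, i): if input_str[i] == input_str[j]: … break'
-- (the break makes it a first-hit scan; indices produced by pyRange are in range, so pyGetD is exact here)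
def pyScanA (cs : List Char) (c : Char) : List Int → Bool
  | [] => false
  | j :: rest => if PySem.List.pyGetD cs j ' ' == c then true else pyScanA cs c rest

def replace_repeated_chars (input_str : String) (k : Int) : String :=
  let cs := input_str.toList
  let modified := (PySem.List.pyRange 0 (cs.length : Int) 1).foldl
    (fun m i =>
      let start := max 0 (i - k)
      if pyScanA cs (PySem.List.pyGetD cs i ' ') (PySem.List.pyRange start i 1)
      then PySem.List.pySetD m i '-' else m) cs
  String.mk modified

-- ===== PORT B =====
def replace_repeated_chars_alt (input_str : String) (k : Int) : String :=
  let r := (PySem.List.enumerate input_str.toList 0).foldl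
    (fun (acc : List Char × PySem.Dict Char Int) p =>
      let out := acc.1 ++ [match acc.2.get? p.2 with
        | some j => if p.1 - j ≤ k then '-' else p.2
        | none => p.2]
      (out, acc.2.insert p.2 p.1))
    ([], PySem.Dict.empty)
  String.mk r.1

-- ===== PRECONDITION & SPEC =====
def Spec_replace_repeated_chars (input_str : String) (k : Int) (out : String) : Prop := out = replace_repeated_chars_alt input_str k
instance (input_str : String) (k : Int) (out : String) : Decidable (Spec_replace_repeated_chars input_str k out) := by unfold Spec_replace_repeated_chars; infer_instance

-- ===== CLAIM (what is proved, stated in full; the proofs are below) =====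
def Claim_equal_replace_repeated_chars : Prop := ∀ (input_str : String) (k : Int), Dom_replace_repeated_chars input_str k → Spec_replace_repeated_chars input_str k (replace_repeated_chars input_str k)

-- ===== LEMMAS AND PROOFS =====

-- common specification: position i is marked iff some earlier position within distance k holds the same char
def markb (cs : List Char) (k : Int) (i : Nat) : Bool :=
  (List.range i).any (fun j => (cs.getD j ' ' == cs.getD i ' ') && decide ((i : Int) - (j : Int) ≤ k))

def specOut (cs : List Char) (k : Int) : List Char :=
  (List.range cs.length).map (fun i => if markb cs k i then '-' else cs.getD i ' ')

-- last occurrence strictly before m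
def lastOcc (cs : List Char) (c : Char) : Nat → Option Int
  | 0 => none
  | m+1 => if cs.getD m ' ' == c then some (m : Int) else lastOcc cs c m

def lastDict (cs : List Char) : PySem.Dict Char Int :=
  (PySem.List.enumerate cs 0).foldl (fun d p => d.insert p.2 p.1) PySem.Dict.empty

theorem getD_append_lt (ys : List Char) (x : Char) (j : Nat) (hj : j < ys.length) :
    (ys ++ [x]).getD j ' ' = ys.getD j ' ' := by
  rw [List.getD_eq_getElem?_getD, List.getD_eq_getElem?_getD, List.getElem?_append_left hj]

theorem getD_append_len (ys : List Char) (x : Char) :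
    (ys ++ [x]).getD ys.length ' ' = x := by
  rw [List.getD_eq_getElem?_getD, List.getElem?_append_right (le_refl _)]
  simp

theorem pyScanA_eq_any (cs : List Char) (c : Char) (js : List Int) :
    pyScanA cs c js = js.any (fun j => PySem.List.pyGetD cs j ' ' == c) := by
  induction js with
  | nil => rfl
  | cons j rest ih =>
    by_cases h : PySem.List.pyGetD cs j ' ' == c
    · simp [pyScanA, h, List.any_cons]
    · simp [pyScanA, h, List.any_cons, ih]

theorem condA_eq_markb (cs : List Char) (k : Int) (i : Nat) :
    pyScanA cs (PySem.List.pyGetD cs (i : Int) ' ')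
      (PySem.List.pyRange (max 0 ((i : Int) - k)) (i : Int) 1) = markb cs k i := by
  rw [pyScanA_eq_any, Bool.eq_iff_iff, List.any_eq_true, markb, List.any_eq_true]
  constructor
  · rintro ⟨j, hj, hje⟩
    rw [PySem.List.mem_pyRange_one] at hj
    have hj0 : 0 ≤ j := le_trans (le_max_left _ _) hj.1
    have hjk : (i : Int) - k ≤ j := le_trans (le_max_right _ _) hj.1
    have hjc : ((j.toNat : Nat) : Int) = j := by omega
    rw [← hjc, PySem.List.pyGetD_natCast, PySem.List.pyGetD_natCast] at hje
    refine ⟨j.toNat, by rw [List.mem_range]; omega, ?_⟩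
    rw [Bool.and_eq_true, decide_eq_true_eq]
    exact ⟨hje, by omega⟩
  · rintro ⟨j, hj, hje⟩
    rw [List.mem_range] at hj
    rw [Bool.and_eq_true, decide_eq_true_eq] at hje
    refine ⟨(j : Int), ?_, ?_⟩
    · rw [PySem.List.mem_pyRange_one]
      exact ⟨max_le (by omega) (by omega), by omega⟩
    · rw [PySem.List.pyGetD_natCast, PySem.List.pyGetD_natCast]
      exact hje.1

-- the partially rewritten list after processing indices < m
def partialA (cs : List Char) (k : Int) (m : Nat) : List Char :=
  (List.range cs.length).map (fun i => if i < m ∧ markb cs k i then '-' else cs.getD i ' ')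

theorem partialA_zero (cs : List Char) (k : Int) : partialA cs k 0 = cs := by
  apply List.ext_getElem
  · simp [partialA]
  · intro i h1 h2
    simp [partialA, List.getD_eq_getElem?_getD, List.getElem?_eq_getElem h2]

theorem set_map_range {α : Type} (f : Nat → α) (n m : Nat) (v : α) :
    ((List.range n).map f).set m v = (List.range n).map (fun i => if m = i then v else f i) := by
  apply List.ext_getElem
  · simp
  · intro i h1 h2
    simp [List.getElem_set]

theorem partialA_succ (cs : List Char) (k : Int) (m : Nat) (hm : m < cs.length) :
    partialA cs k (m+1)
      = if markb cs k m then (partialA cs k m).set m '-' else partialA cs k m := by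
  by_cases hmark : markb cs k m = true
  · rw [if_pos hmark]
    unfold partialA
    rw [set_map_range]
    apply List.map_congr_left
    intro i hi
    rw [List.mem_range] at hi
    by_cases him : i = m
    · rw [him, if_pos rfl]
      exact if_pos ⟨Nat.lt_succ_self m, hmark⟩
    · rw [if_neg (fun h : m = i => him h.symm)]
      have hiff : (i < m + 1 ∧ markb cs k i = true) ↔ (i < m ∧ markb cs k i = true) := by
        constructor
        · rintro ⟨a, b⟩; exact ⟨by omega, b⟩
        · rintro ⟨a, b⟩; exact ⟨by omega, b⟩
      exact if_congr hiff rfl rfl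
  · rw [if_neg (by simp [hmark])]
    apply List.map_congr_left
    intro i _
    have hiff : (i < m + 1 ∧ markb cs k i = true) ↔ (i < m ∧ markb cs k i = true) := by
      constructor
      · rintro ⟨a, b⟩
        rcases Nat.lt_succ_iff_lt_or_eq.mp a with h | h
        · exact ⟨h, b⟩
        · subst h; exact absurd b hmark
      · rintro ⟨a, b⟩; exact ⟨by omega, b⟩
    rw [if_congr hiff rfl rfl]

theorem foldA_eq_partial (cs : List Char) (k : Int) (m : Nat) (hm : m ≤ cs.length) :
    (PySem.List.pyRange 0 (m : Int) 1).foldl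
      (fun mo i =>
        if pyScanA cs (PySem.List.pyGetD cs i ' ') (PySem.List.pyRange (max 0 (i - k)) i 1)
        then PySem.List.pySetD mo i '-' else mo) cs = partialA cs k m := by
  induction m with
  | zero =>
    rw [Nat.cast_zero, PySem.List.pyRange_one_eq_nil (le_refl 0), List.foldl_nil,
      partialA_zero]
  | succ m ih =>
    have hsplit : PySem.List.pyRange 0 ((m + 1 : Nat) : Int) 1
        = PySem.List.pyRange 0 (m : Int) 1 ++ [(m : Int)] := by
      have h1 : ((m + 1 : Nat) : Int) = (m : Int) + 1 := by push_cast; ring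
      rw [h1, PySem.List.pyRange_one_succ_right (by omega)]
    rw [hsplit, List.foldl_append, ih (by omega)]
    simp only [List.foldl_cons, List.foldl_nil]
    rw [condA_eq_markb cs k m, partialA_succ cs k m (by omega)]
    by_cases hmark : markb cs k m = true
    · rw [if_pos hmark, if_pos hmark, PySem.List.pySetD_natCast]
    · rw [if_neg (by simp [hmark]), if_neg (by simp [hmark])]

theorem portA_eq_spec (input_str : String) (k : Int) :
    replace_repeated_chars input_str k = String.mk (specOut input_str.toList k) := by
  unfold replace_repeated_chars
  have h := foldA_eq_partial input_str.toList k input_str.toList.length (le_refl _)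
  simp only at h ⊢
  rw [h]
  congr 1
  unfold partialA specOut
  apply List.map_congr_left
  intro i hi
  rw [List.mem_range] at hi
  exact if_congr ⟨fun h => h.2, fun h => ⟨hi, h⟩⟩ rfl rfl

-- properties of lastOcc
theorem lastOcc_some (cs : List Char) (c : Char) (m : Nat) (j : Int)
    (h : lastOcc cs c m = some j) :
    0 ≤ j ∧ j < m ∧ cs.getD j.toNat ' ' = c ∧
      ∀ j' : Nat, j < (j' : Int) → j' < m → cs.getD j' ' ' ≠ c := by
  induction m with
  | zero => simp [lastOcc] at h
  | succ m ih =>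
    simp only [lastOcc] at h
    by_cases hc : cs.getD m ' ' == c
    · rw [if_pos hc, Option.some_inj] at h
      subst h
      refine ⟨by omega, by omega, by simpa using hc, ?_⟩
      intro j' h1 h2 _
      omega
    · rw [if_neg hc] at h
      obtain ⟨h0, hlt, heq, hmax⟩ := ih h
      refine ⟨h0, by omega, heq, ?_⟩
      intro j' h1 h2
      rcases Nat.lt_succ_iff_lt_or_eq.mp h2 with hh | hh
      · exact hmax j' h1 hh
      · subst hh; simpa using hc

theorem lastOcc_none (cs : List Char) (c : Char) (m : Nat)
    (h : lastOcc cs c m = none) : ∀ j < m, cs.getD j ' ' ≠ c := by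
  induction m with
  | zero => omega
  | succ m ih =>
    simp only [lastOcc] at h
    by_cases hc : cs.getD m ' ' == c
    · rw [if_pos hc] at h; cases h
    · rw [if_neg hc] at h
      intro j hj
      rcases Nat.lt_succ_iff_lt_or_eq.mp hj with hh | hh
      · exact ih h j hh
      · subst hh; simpa using hc

-- B's per-step decision agrees with markb
theorem lastOcc_markb (cs : List Char) (k : Int) (m : Nat) :
    (match lastOcc cs (cs.getD m ' ') m with
      | some j => if (m : Int) - j ≤ k then '-' else cs.getD m ' '
      | none => cs.getD m ' ')
    = (if markb cs k m then '-' else cs.getD m ' ') := by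
  cases hlo : lastOcc cs (cs.getD m ' ') m with
  | none =>
    have hnone := lastOcc_none cs (cs.getD m ' ') m hlo
    have hmb : markb cs k m = false := by
      rw [Bool.eq_false_iff, Ne, markb, List.any_eq_true]
      rintro ⟨j, hj, hje⟩
      rw [List.mem_range] at hj
      rw [Bool.and_eq_true] at hje
      exact hnone j hj (by simpa using hje.1)
    simp [hmb]
  | some j =>
    obtain ⟨h0, hlt, heq, hmax⟩ := lastOcc_some cs (cs.getD m ' ') m j hlo
    by_cases hk : (m : Int) - j ≤ k
    · simp only [if_pos hk]
      have hmb : markb cs k m = true := by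
        rw [markb, List.any_eq_true]
        refine ⟨j.toNat, by rw [List.mem_range]; omega, ?_⟩
        rw [Bool.and_eq_true, beq_iff_eq, decide_eq_true_eq]
        exact ⟨heq, by omega⟩
      simp [hmb]
    · simp only [if_neg hk]
      have hmb : markb cs k m = false := by
        rw [Bool.eq_false_iff, Ne, markb, List.any_eq_true]
        rintro ⟨j', hj', hje⟩
        rw [List.mem_range] at hj'
        rw [Bool.and_eq_true, beq_iff_eq, decide_eq_true_eq] at hje
        by_cases hcmp : j < (j' : Int)
        · exact hmax j' hcmp hj' hje.1
        · omega
      simp [hmb]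

theorem lastOcc_append (ys : List Char) (x : Char) (c : Char) (m : Nat) (hm : m ≤ ys.length) :
    lastOcc (ys ++ [x]) c m = lastOcc ys c m := by
  induction m with
  | zero => rfl
  | succ m ih =>
    simp only [lastOcc]
    rw [getD_append_lt ys x m (by omega), ih (by omega)]

theorem lastDict_get (xs : List Char) (c : Char) :
    (lastDict xs).get? c = lastOcc xs c xs.length := by
  induction xs using List.reverseRecOn with
  | nil => simp [lastDict, lastOcc, PySem.List.enumerate_nil, PySem.Dict.get?_empty]
  | append_singleton ys x ih =>
    unfold lastDict at ih ⊢
    rw [PySem.List.enumerate_append, List.foldl_append]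
    simp only [PySem.List.enumerate_cons, PySem.List.enumerate_nil, List.foldl_cons, List.foldl_nil]
    rw [List.length_append, List.length_singleton]
    simp only [lastOcc, getD_append_len]
    rw [PySem.Dict.get?_insert]
    by_cases hx : x == c
    · rw [if_pos hx, if_pos (beq_iff_eq.mp hx).symm]
      norm_num
    · rw [if_neg hx, if_neg (fun h => hx (beq_iff_eq.mpr h.symm)), ih,
        lastOcc_append ys x c ys.length (le_refl _)]

theorem markb_append (ys : List Char) (x : Char) (k : Int) (i : Nat) (hi : i < ys.length) :
    markb (ys ++ [x]) k i = markb ys k i := by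
  unfold markb
  apply PySem.List.any_congr_mem
  intro j hj
  rw [List.mem_range] at hj
  rw [getD_append_lt ys x j (by omega), getD_append_lt ys x i hi]

theorem specOut_append (ys : List Char) (x : Char) (k : Int) :
    specOut (ys ++ [x]) k
      = specOut ys k ++ [if markb (ys ++ [x]) k ys.length then '-' else x] := by
  unfold specOut
  rw [List.length_append, List.length_singleton, List.range_succ, List.map_append]
  congr 1
  · apply List.map_congr_left
    intro i hi
    rw [List.mem_range] at hi
    rw [markb_append ys x k i hi, getD_append_lt ys x i hi]
  · rw [List.map_singleton, getD_append_len]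

theorem portB_eq_spec (input_str : String) (k : Int) :
    replace_repeated_chars_alt input_str k = String.mk (specOut input_str.toList k) := by
  unfold replace_repeated_chars_alt
  suffices h : ∀ (xs : List Char), ((PySem.List.enumerate xs 0).foldl
      (fun (acc : List Char × PySem.Dict Char Int) p =>
        (acc.1 ++ [match acc.2.get? p.2 with
          | some j => if p.1 - j ≤ k then '-' else p.2
          | none => p.2], acc.2.insert p.2 p.1))
      ([], PySem.Dict.empty)) = (specOut xs k, lastDict xs) by
    simp only
    rw [h input_str.toList]
  intro xs
  induction xs using List.reverseRecOn with
  | nil => simp [specOut, lastDict, PySem.List.enumerate_nil]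
  | append_singleton ys x ih =>
    rw [PySem.List.enumerate_append, List.foldl_append, ih]
    simp only [PySem.List.enumerate_cons, PySem.List.enumerate_nil, List.foldl_cons, List.foldl_nil]
    rw [Prod.mk.injEq]
    refine ⟨?_, ?_⟩
    · rw [lastDict_get, zero_add, specOut_append]
      have h1 := lastOcc_markb (ys ++ [x]) k ys.length
      rw [getD_append_len, lastOcc_append ys x x ys.length (le_refl _)] at h1
      rw [← h1]
    · unfold lastDict
      rw [PySem.List.enumerate_append, List.foldl_append]
      simp [PySem.List.enumerate_cons, PySem.List.enumerate_nil]

-- ===== VERDICT (by name: the statement is the Claim_ definition above) =====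
theorem replace_repeated_chars_spec : Claim_equal_replace_repeated_chars := by
  intro input_str k _
  unfold Spec_replace_repeated_chars
  rw [portA_eq_spec, portB_eq_spec]
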